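-- pv_equiv track=rewrite | github.com/vpc20/python-tools | create_interval_array.py | create_intv_arr
-- ===== SOURCE A (Python) =====
-- def create_intv_arr(text):
--     intvn = -1
--     intvs = []
--     for line in text.split('\n'):
--         stime = -1  # start time
--         ftime = -1  # finish time
--         for i, c in enumerate(line):
--             if c == '|':
--                 if stime == -1:
--                     stime = i
--                 else:
--                     ftime = i
--                     intvn += 1
--                     intvs.append((stime, ftime, chr(intvn + 97)))
--                     stime = -1
--                     ftime = -1
--     return intvs
-- ===== SOURCE B (Python) =====
-- def _pair_up(pos):
--     # pair consecutive pipe positions; a trailing unpaired one is dropped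
--     if len(pos) < 2:
--         return []
--     return [(pos[0], pos[1])] + _pair_up(pos[2:])
--
--
-- def create_intv_arr(text):
--     intvs = []
--     n = 0
--     for line in text.split('\n'):
--         positions = [i for i, c in enumerate(line) if c == '|']
--         for a, b in _pair_up(positions):
--             intvs.append((a, b, chr(97 + n)))
--             n += 1
--     return intvs
-- ===== Notes on version B (the rewrite author's own statement) =====
-- stated objective: alternative
-- what changed: Replaces A's single stateful character scan (stime/ftime state machine) with a two-phase decomposition per line: collect all pipe positions with a comprehension, then pair consecutive positions with a separate recursive pairing helper and label the pairs.
import Mathlib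
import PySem

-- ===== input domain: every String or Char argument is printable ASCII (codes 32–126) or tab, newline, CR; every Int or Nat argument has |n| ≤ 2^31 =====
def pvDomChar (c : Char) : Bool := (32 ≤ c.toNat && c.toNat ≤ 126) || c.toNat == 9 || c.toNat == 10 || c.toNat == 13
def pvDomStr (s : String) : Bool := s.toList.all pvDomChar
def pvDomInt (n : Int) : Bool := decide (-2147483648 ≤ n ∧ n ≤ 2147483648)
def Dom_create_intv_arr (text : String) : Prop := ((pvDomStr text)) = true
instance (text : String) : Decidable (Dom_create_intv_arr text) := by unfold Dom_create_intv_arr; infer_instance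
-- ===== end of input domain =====

-- B replaces A's stateful stime/ftime scan with a two-phase decomposition (collect pipe positions, then pair them); objective: alternative.


-- ===== PORT A =====
-- state = (stime, ftime, intvn, intvs); one step per enumerated character
def pvAStep (s : Int × Int × Int × List (Int × Int × String)) (ic : Int × Char) :
    Int × Int × Int × List (Int × Int × String) :=
  let (stime, ftime, intvn, intvs) := s
  if ic.2 = '|' then
    if stime = -1 then (ic.1, ftime, intvn, intvs)
    else
      let intvn' := intvn + 1
      (-1, -1, intvn', intvs ++ [(stime, ic.1, String.ofList [Char.ofNat (intvn' + 97).toNat])])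
  else (stime, ftime, intvn, intvs)

def create_intv_arr (text : String) : List (Int × Int × String) :=
  let r := ((PySem.Str.split? text "\n").getD []).foldl
    (fun (acc : Int × List (Int × Int × String)) (line : String) =>
      let st := (PySem.List.enumerate line.toList).foldl pvAStep (-1, -1, acc.1, acc.2)
      (st.2.2.1, st.2.2.2))
    (-1, [])
  r.2

-- ===== PORT B =====
-- pair consecutive positions; a trailing unpaired one is dropped (port of _pair_up)
def pvPairUp : List Int → List (Int × Int)
  | a :: b :: rest => (a, b) :: pvPairUp rest
  | _ => []

def create_intv_arr_alt (text : String) : List (Int × Int × String) :=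
  let r := ((PySem.Str.split? text "\n").getD []).foldl
    (fun (acc : Int × List (Int × Int × String)) (line : String) =>
      let positions := (PySem.List.enumerate line.toList).filterMap
        (fun ic => if ic.2 = '|' then some ic.1 else none)
      (pvPairUp positions).foldl
        (fun (a : Int × List (Int × Int × String)) (p : Int × Int) =>
          (a.1 + 1, a.2 ++ [(p.1, p.2, String.ofList [Char.ofNat (97 + a.1).toNat])]))
        acc)
    (0, [])
  r.2

-- ===== PRECONDITION & SPEC =====
def Spec_create_intv_arr (text : String) (out : List (Int × Int × String)) : Prop := out = create_intv_arr_alt text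
instance (text : String) (out : List (Int × Int × String)) : Decidable (Spec_create_intv_arr text out) := by unfold Spec_create_intv_arr; infer_instance

-- ===== CLAIM (what is proved, stated in full; the proofs are below) =====
def Claim_equal_create_intv_arr : Prop := ∀ (text : String), Dom_create_intv_arr text → Spec_create_intv_arr text (create_intv_arr text)

-- ===== LEMMAS AND PROOFS =====

-- the labelled interval list that B's inner fold appends, written structurally
def pvLabel (n : Int) : List (Int × Int) → List (Int × Int × String)
  | [] => []
  | p :: ps => (p.1, p.2, String.ofList [Char.ofNat (97 + n).toNat]) :: pvLabel (n + 1) ps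

lemma pvBFold_eq (ps : List (Int × Int)) (n : Int) (acc : List (Int × Int × String)) :
    ps.foldl (fun (a : Int × List (Int × Int × String)) (p : Int × Int) =>
        (a.1 + 1, a.2 ++ [(p.1, p.2, String.ofList [Char.ofNat (97 + a.1).toNat])])) (n, acc)
      = (n + ps.length, acc ++ pvLabel n ps) := by
  induction ps generalizing n acc with
  | nil => simp [pvLabel]
  | cons p ps ih =>
    rw [List.foldl_cons, ih]
    simp only [pvLabel, List.length_cons, List.append_assoc, List.singleton_append, Prod.mk.injEq]
    refine ⟨by push_cast; ring, by trivial⟩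

def pvPos (cs : List (Int × Char)) : List Int :=
  cs.filterMap (fun ic => if ic.2 = '|' then some ic.1 else none)

-- inner-loop invariant for A's scan: with no pending start, the scan pairs exactly
-- the pipe positions; with pending start s, it pairs s consed in front.
lemma pvInner (cs : List (Int × Char)) (hnn : ∀ p ∈ cs, 0 ≤ p.1) :
    ∀ (n : Int) (acc : List (Int × Int × String)),
      ((cs.foldl pvAStep (-1, -1, n - 1, acc)).2.2
          = (n - 1 + (pvPairUp (pvPos cs)).length, acc ++ pvLabel n (pvPairUp (pvPos cs))))
      ∧ ∀ s : Int, 0 ≤ s →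
        ((cs.foldl pvAStep (s, -1, n - 1, acc)).2.2
          = (n - 1 + (pvPairUp (s :: pvPos cs)).length, acc ++ pvLabel n (pvPairUp (s :: pvPos cs)))) := by
  induction cs with
  | nil =>
    intro n acc
    refine ⟨by simp [pvPos, pvPairUp, pvLabel], fun s _ => by simp [pvPos, pvPairUp, pvLabel]⟩
  | cons c rest ih =>
    intro n acc
    have hc : 0 ≤ c.1 := hnn c (by simp)
    have hrest : ∀ p ∈ rest, 0 ≤ p.1 := fun p hp => hnn p (by simp [hp])
    by_cases hpipe : c.2 = '|'
    · constructor
      · -- no pending start: c.1 becomes the pending start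
        have hstep : pvAStep (-1, -1, n - 1, acc) c = (c.1, -1, n - 1, acc) := by
          simp [pvAStep, hpipe]
        have hpos : pvPos (c :: rest) = c.1 :: pvPos rest := by simp [pvPos, hpipe]
        rw [List.foldl_cons, hstep, hpos]
        exact (ih hrest n acc).2 c.1 hc
      · -- pending start s: the pair (s, c.1) is emitted
        intro s hs
        have hsne : s ≠ -1 := by omega
        have harith2 : (n : Int) + 97 = 97 + n := by ring
        have hstep : pvAStep (s, -1, n - 1, acc) c
            = (-1, -1, n, acc ++ [(s, c.1, String.ofList [Char.ofNat (97 + n).toNat])]) := by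
          simp [pvAStep, hpipe, hsne, harith2]
        have hpos : pvPos (c :: rest) = c.1 :: pvPos rest := by simp [pvPos, hpipe]
        rw [List.foldl_cons, hstep, hpos]
        have hI := (ih hrest (n + 1)
          (acc ++ [(s, c.1, String.ofList [Char.ofNat (97 + n).toNat])])).1
        simp only [add_sub_cancel_right] at hI
        rw [hI]
        simp only [pvPairUp, pvLabel, List.length_cons, List.append_assoc,
          List.singleton_append, Prod.mk.injEq]
        refine ⟨by push_cast; ring, by trivial⟩
    · -- not a pipe: state unchanged, position list unchanged
      have hpos : pvPos (c :: rest) = pvPos rest := by simp [pvPos, hpipe]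
      have hstepA : ∀ st, pvAStep st c = st := by
        intro st; simp [pvAStep, hpipe]
      constructor
      · rw [List.foldl_cons, hstepA, hpos]; exact (ih hrest n acc).1
      · intro s hs
        rw [List.foldl_cons, hstepA, hpos]
        exact (ih hrest n acc).2 s hs

lemma pvEnum_nonneg (cs : List Char) : ∀ p ∈ PySem.List.enumerate cs, 0 ≤ p.1 := by
  intro p hp
  rw [PySem.List.mem_enumerate_iff] at hp
  obtain ⟨k, hk, rfl⟩ := hp
  simp

-- outer loops agree: A's accumulator (intvn, intvs) tracks B's (n, intvs) with intvn = n - 1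
lemma pvOuter (lines : List String) :
    ∀ (n : Int) (acc : List (Int × Int × String)),
      lines.foldl
        (fun (a : Int × List (Int × Int × String)) (line : String) =>
          let st := (PySem.List.enumerate line.toList).foldl pvAStep (-1, -1, a.1, a.2)
          (st.2.2.1, st.2.2.2)) (n - 1, acc)
      = (let r := lines.foldl
          (fun (a : Int × List (Int × Int × String)) (line : String) =>
            let positions := (PySem.List.enumerate line.toList).filterMap
              (fun ic => if ic.2 = '|' then some ic.1 else none)
            (pvPairUp positions).foldl
              (fun (a : Int × List (Int × Int × String)) (p : Int × Int) =>
                (a.1 + 1, a.2 ++ [(p.1, p.2, String.ofList [Char.ofNat (97 + a.1).toNat])]))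
              a) (n, acc)
         (r.1 - 1, r.2)) := by
  induction lines with
  | nil => intro n acc; simp
  | cons line rest ih =>
    intro n acc
    simp only [List.foldl_cons]
    have hst := (pvInner (PySem.List.enumerate line.toList) (pvEnum_nonneg _) n acc).1
    rw [pvBFold_eq]
    set ps := pvPairUp (pvPos (PySem.List.enumerate line.toList)) with hps
    have h1 : ((PySem.List.enumerate line.toList).foldl pvAStep (-1, -1, n - 1, acc)).2.2.1
        = n - 1 + ps.length := by rw [hst]
    have h2 : ((PySem.List.enumerate line.toList).foldl pvAStep (-1, -1, n - 1, acc)).2.2.2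
        = acc ++ pvLabel n ps := by rw [hst]
    rw [h1, h2]
    have hrec := ih (n + ps.length) (acc ++ pvLabel n ps)
    rw [show (n : Int) - 1 + ps.length = (n + ps.length) - 1 by ring]
    exact hrec

-- ===== VERDICT (by name: the statement is the Claim_ definition above) =====
theorem create_intv_arr_spec : Claim_equal_create_intv_arr := by
  intro text _
  unfold Spec_create_intv_arr create_intv_arr create_intv_arr_alt
  have h := pvOuter ((PySem.Str.split? text "\n").getD []) 0 []
  norm_num at h
  rw [h]
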